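-- pv_equiv track=rewrite | github.com/edri2or-commits/project38-or | src/agents/smart_email/nodes/format_rtl.py | wrap_english
-- ===== SOURCE A (Python) =====
-- RLM = "\u200F"
--
-- def wrap_english(text: str) -> str:
--     """Wrap English text in RTL markers for proper display.
--
--     Args:
--         text: Text that may contain English
--
--     Returns:
--         Text with RTL markers
--     """
--     # Simple approach: wrap known English terms
--     english_terms = [
--         "API", "OAuth", "webhook", "deploy", "PR", "CI/CD",
--         "Railway", "GitHub", "Gmail", "Telegram",
--     ]
--     for term in english_terms:
--         if term in text:
--             text = text.replace(term, f"{RLM}{term}{RLM}")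
--     return text
-- ===== SOURCE B (Python) =====
-- RLM = "\u200F"
--
-- TERMS = [
--     "API", "OAuth", "webhook", "deploy", "PR", "CI/CD",
--     "Railway", "GitHub", "Gmail", "Telegram",
-- ]
--
--
-- def wrap_english(text: str) -> str:
--     """Wrap English text in RTL markers: single left-to-right scan that
--     matches any known term at the current position and wraps it in place."""
--     out = []
--     i = 0
--     n = len(text)
--     while i < n:
--         for term in TERMS:
--             if text.startswith(term, i):
--                 out.append(RLM + term + RLM)
--                 i += len(term)
--                 break
--         else:
--             out.append(text[i])
--             i += 1
--     return "".join(out)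
-- ===== Notes on version B (the rewrite author's own statement) =====
-- stated objective: alternative
-- what changed: Replaces the ten sequential str.replace passes (one full scan of the evolving text per term) by a single left-to-right scan that tries to match a term at each position and wraps it in place; equivalence rests on the terms having no substring/overlap relations and on the inserted RLM markers creating no new matches.
import Mathlib
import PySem

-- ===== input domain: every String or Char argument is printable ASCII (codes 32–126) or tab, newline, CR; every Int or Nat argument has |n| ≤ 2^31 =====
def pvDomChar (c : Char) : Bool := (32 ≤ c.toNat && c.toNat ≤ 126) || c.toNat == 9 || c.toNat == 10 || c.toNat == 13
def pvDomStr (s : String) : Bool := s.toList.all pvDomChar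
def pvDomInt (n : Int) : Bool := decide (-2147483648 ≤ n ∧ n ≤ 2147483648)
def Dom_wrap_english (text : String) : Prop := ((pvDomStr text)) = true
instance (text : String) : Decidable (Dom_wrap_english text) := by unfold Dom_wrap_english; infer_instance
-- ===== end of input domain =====

-- B replaces A's ten sequential str.replace passes by one left-to-right scan that wraps a
-- matched term in place (objective: alternative single-traversal algorithm, same exact output).

-- ===== PORT A =====

def RLMc : Char := Char.ofNat 0x200F
def pyRLM : String := String.ofList [RLMc]
def englishTerms : List String :=
  ["API", "OAuth", "webhook", "deploy", "PR", "CI/CD", "Railway", "GitHub", "Gmail", "Telegram"]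

def wrap_english (text : String) : String :=
  englishTerms.foldl
    (fun t term =>
      if PySem.Str.isIn term t then PySem.Str.replace t term (pyRLM ++ term ++ pyRLM) else t)
    text

-- ===== PORT B =====
-- single left-to-right scan: at each position try each term; wrap a match in place
def termsB : List (List Char) :=
  (["API", "OAuth", "webhook", "deploy", "PR", "CI/CD",
    "Railway", "GitHub", "Gmail", "Telegram"] : List String).map String.toList

def scanWrap (ts : List (List Char)) : List Char → List Char
  | [] => []
  | c :: cs =>
    match ts.find? (fun t => PySem.Chars.startswith (c :: cs) t) with
    | some t => RLMc :: (t ++ RLMc :: scanWrap ts (cs.drop (t.length - 1)))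
    | none => c :: scanWrap ts cs
termination_by s => s.length
decreasing_by all_goals simp [List.length_drop]

def wrap_english_alt (text : String) : String :=
  String.ofList (scanWrap termsB text.toList)


-- ===== PRECONDITION & SPEC =====
def Spec_wrap_english (text : String) (out : String) : Prop := out = wrap_english_alt text
instance (text : String) (out : String) : Decidable (Spec_wrap_english text out) := by unfold Spec_wrap_english; infer_instance

-- ===== CLAIM (what is proved, stated in full; the proofs are below) =====
def Claim_equal_wrap_english : Prop := ∀ (text : String), Dom_wrap_english text → Spec_wrap_english text (wrap_english text)

-- ===== LEMMAS AND PROOFS =====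
-- equation lemmas
theorem scanWrap_nil (ts : List (List Char)) : scanWrap ts [] = [] := by rw [scanWrap.eq_def]
theorem scanWrap_cons_match (ts : List (List Char)) (c : Char) (cs t : List Char)
    (h : ts.find? (fun t => PySem.Chars.startswith (c :: cs) t) = some t) :
    scanWrap ts (c :: cs) = RLMc :: (t ++ RLMc :: scanWrap ts (cs.drop (t.length - 1))) := by
  rw [scanWrap.eq_def]; dsimp only; rw [h]
theorem scanWrap_cons_none (ts : List (List Char)) (c : Char) (cs : List Char)
    (h : ts.find? (fun t => PySem.Chars.startswith (c :: cs) t) = none) :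
    scanWrap ts (c :: cs) = c :: scanWrap ts cs := by
  rw [scanWrap.eq_def]; dsimp only; rw [h]

theorem prefix_append_cases {t u v : List Char} (h : t <+: u ++ v) : t <+: u ∨ u <+: t :=
  List.prefix_or_prefix_of_prefix h (List.prefix_append u v)

theorem prefix_through {t u x : List Char} {c : Char} (h : t <+: u ++ c :: x) :
    t <+: u ∨ c ∈ t := by
  rcases prefix_append_cases h with h1 | h1
  · exact Or.inl h1
  · obtain ⟨t₂, rfl⟩ := h1
    have h2 : t₂ <+: c :: x := (List.prefix_append_right_inj u).mp h
    cases t₂ with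
    | nil => exact Or.inl (by simp)
    | cons a t₃ =>
      obtain ⟨rfl, -⟩ := List.cons_prefix_cons.mp h2
      exact Or.inr (by simp)

-- t <+: scanWrap ts s → t <+: s, for ASCII t
theorem prefix_scan (ts : List (List Char)) :
    ∀ (t : List Char), RLMc ∉ t → ∀ s : List Char, t <+: scanWrap ts s → t <+: s := by
  intro t hR s
  induction s generalizing t with
  | nil => simp [scanWrap_nil]
  | cons c cs ih =>
    intro h
    cases hf : ts.find? (fun t' => PySem.Chars.startswith (c :: cs) t') with
    | some t' =>
      rw [scanWrap_cons_match ts c cs t' hf] at h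
      cases t with
      | nil => exact List.nil_prefix
      | cons a t₂ =>
        obtain ⟨rfl, -⟩ := List.cons_prefix_cons.mp h
        exact absurd (by simp) hR
    | none =>
      rw [scanWrap_cons_none ts c cs hf] at h
      cases t with
      | nil => exact List.nil_prefix
      | cons a t₂ =>
        obtain ⟨rfl, h2⟩ := List.cons_prefix_cons.mp h
        exact List.cons_prefix_cons.mpr ⟨rfl, ih t₂ (fun hm => hR (by simp [hm])) h2⟩

-- pass an unmatched segment through
theorem scan_pass_seg (ts : List (List Char)) :
    ∀ (u r : List Char),
      (∀ j, j < u.length → ts.find? (fun t => PySem.Chars.startswith (u.drop j ++ r) t) = none) →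
      scanWrap ts (u ++ r) = u ++ scanWrap ts r := by
  intro u
  induction u with
  | nil => intro r _; simp
  | cons a u' ih =>
    intro r h
    have h0 := h 0 (by simp)
    simp only [List.drop_zero] at h0
    rw [List.cons_append]
    rw [scanWrap_cons_none ts a (u' ++ r) (by simpa using h0)]
    rw [ih r (fun j hj => by simpa using h (j + 1) (by simpa using hj))]; simp

theorem find_single_pos {t : List Char} {p : List Char → Bool} (h : p t = true) :
    [t].find? p = some t := by simp [h]
theorem find_single_neg {t : List Char} {p : List Char → Bool} (h : p t = false) :
    [t].find? p = none := by simp [h]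

theorem prefix_decomp {t' : List Char} {c : Char} {cs : List Char}
    (h : t' <+: c :: cs) (hne : t' ≠ []) :
    c :: cs = t' ++ cs.drop (t'.length - 1) := by
  cases t' with
  | nil => exact absurd rfl hne
  | cons b t₂ =>
    obtain ⟨w, hw⟩ := h
    obtain ⟨rfl, hw2⟩ : b = c ∧ t₂ ++ w = cs := by
      simpa [List.cons_append] using hw
    have hw3 : cs.drop t₂.length = w := by rw [← hw2, List.drop_left]
    simp [List.cons_append, hw3, hw2]

theorem scan_compose (ts : List (List Char)) (t : List Char)
    (hne : t ≠ []) (hR : RLMc ∉ t)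
    (hpre : ∀ t' ∈ ts, t' ≠ [])
    (hinf : ∀ t' ∈ ts, ¬ t <:+: t')
    (hov : ∀ t' ∈ ts, ∀ j, j < t.length → 0 < j →
      ¬ (t.drop j <+: t') ∧ ¬ (t' <+: t.drop j)) :
    ∀ s : List Char, scanWrap [t] (scanWrap ts s) = scanWrap (ts ++ [t]) s := by
  have main : ∀ (n : Nat) (s : List Char), s.length ≤ n →
      scanWrap [t] (scanWrap ts s) = scanWrap (ts ++ [t]) s := by
    intro n
    induction n with
    | zero =>
      intro s hs
      have : s = [] := by cases s <;> simp_all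
      subst this; simp [scanWrap_nil]
    | succ n ih =>
      intro s hs
      cases s with
      | nil => simp [scanWrap_nil]
      | cons c cs =>
        have hlcs : cs.length ≤ n := by simpa using hs
        cases hf : ts.find? (fun t' => PySem.Chars.startswith (c :: cs) t') with
        | some t' =>
          have ht'mem : t' ∈ ts := List.mem_of_find?_eq_some hf
          have ht'pre : t' <+: c :: cs :=
            (PySem.Chars.startswith_iff _ _).mp (List.find?_some hf)
          have ht'ne : t' ≠ [] := hpre t' ht'mem
          have hfB : (ts ++ [t]).find? (fun t' => PySem.Chars.startswith (c :: cs) t') = some t' := by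
            rw [List.find?_append, hf]; rfl
          rw [scanWrap_cons_match ts c cs t' hf, scanWrap_cons_match _ c cs t' hfB]
          -- LHS: pass RLMc :: t' ++ [RLMc] through scanWrap [t]
          have hpass : scanWrap [t] ((RLMc :: t' ++ [RLMc]) ++ scanWrap ts (cs.drop (t'.length - 1)))
              = (RLMc :: t' ++ [RLMc]) ++ scanWrap [t] (scanWrap ts (cs.drop (t'.length - 1))) := by
            apply scan_pass_seg
            intro j hj
            apply find_single_neg
            rcases j with _ | k
            · -- t would start with RLMc
              simp only [List.drop_zero]
              rw [Bool.eq_false_iff]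
              intro hsw
              have hp := (PySem.Chars.startswith_iff _ _).mp hsw
              cases t with
              | nil => exact hne rfl
              | cons a t₂ =>
                obtain ⟨rfl, -⟩ := List.cons_prefix_cons.mp (by simpa using hp)
                exact hR (by simp)
            · -- inside t' ++ [RLMc]
              have hk : k ≤ t'.length := by
                simpa [List.length_append] using Nat.lt_succ_iff.mp (by simpa using hj)
              rw [Bool.eq_false_iff]
              intro hsw
              have hp := (PySem.Chars.startswith_iff _ _).mp hsw
              have hdrop : (RLMc :: t' ++ [RLMc]).drop (k + 1) = t'.drop k ++ [RLMc] := by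
                simpa using List.drop_append_of_le_length hk (l₂ := [RLMc])
              rw [hdrop] at hp
              have hp2 : t <+: (t'.drop k) ++ RLMc :: scanWrap ts (cs.drop (t'.length - 1)) := by
                simpa using hp
              rcases prefix_through hp2 with h1 | h1
              · exact hinf t' ht'mem (h1.isInfix.trans (List.drop_suffix k t').isInfix)
              · exact hR h1
          calc scanWrap [t] (RLMc :: (t' ++ RLMc :: scanWrap ts (cs.drop (t'.length - 1))))
              = scanWrap [t] ((RLMc :: t' ++ [RLMc]) ++ scanWrap ts (cs.drop (t'.length - 1))) := by
                simp
            _ = (RLMc :: t' ++ [RLMc]) ++ scanWrap [t] (scanWrap ts (cs.drop (t'.length - 1))) := hpass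
            _ = RLMc :: (t' ++ RLMc :: scanWrap (ts ++ [t]) (cs.drop (t'.length - 1))) := by
                rw [ih _ (le_trans (by simp [List.length_drop]) hlcs)]; simp
        | none =>
          cases hswt : PySem.Chars.startswith (c :: cs) t with
          | true =>
            have htpre : t <+: c :: cs := (PySem.Chars.startswith_iff _ _).mp hswt
            have hdecomp := prefix_decomp htpre hne
            have hfB : (ts ++ [t]).find? (fun t' => PySem.Chars.startswith (c :: cs) t') = some t := by
              rw [List.find?_append, hf]; exact find_single_pos hswt
            rw [scanWrap_cons_match _ c cs t hfB]
            -- ts passes over the whole t-region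
            have hall : ∀ j, j < t.length →
                ts.find? (fun t'' => PySem.Chars.startswith (t.drop j ++ cs.drop (t.length - 1)) t'') = none := by
              intro j hj
              rcases Nat.eq_zero_or_pos j with rfl | hjpos
              · simpa [← hdecomp] using hf
              · rw [List.find?_eq_none]
                intro t'' ht''mem
                rw [Bool.not_eq_true, Bool.eq_false_iff]
                intro hsw
                have hp := (PySem.Chars.startswith_iff _ _).mp hsw
                rcases prefix_append_cases hp with h1 | h1
                · exact (hov t'' ht''mem j hj hjpos).2 h1
                · exact (hov t'' ht''mem j hj hjpos).1 h1
            have hts : scanWrap ts (c :: cs) = t ++ scanWrap ts (cs.drop (t.length - 1)) := by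
              rw [hdecomp]
              exact scan_pass_seg ts t _ hall
            rw [hts]
            cases t with
            | nil => exact absurd rfl hne
            | cons a t₂ =>
              obtain ⟨rfl, -⟩ := List.cons_prefix_cons.mp htpre
              have hfind : [a :: t₂].find?
                  (fun t' => PySem.Chars.startswith ((a :: t₂) ++ scanWrap ts (cs.drop ((a :: t₂).length - 1))) t') = some (a :: t₂) := by
                apply find_single_pos
                exact (PySem.Chars.startswith_iff _ _).mpr (List.prefix_append _ _)
              rw [show (a :: t₂) ++ scanWrap ts (cs.drop ((a :: t₂).length - 1))
                    = a :: (t₂ ++ scanWrap ts (cs.drop ((a :: t₂).length - 1))) from by simp]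
              rw [scanWrap_cons_match _ a _ (a :: t₂) (by simpa using hfind)]
              have hdrop2 : (t₂ ++ scanWrap ts (cs.drop ((a :: t₂).length - 1))).drop ((a :: t₂).length - 1)
                  = scanWrap ts (cs.drop ((a :: t₂).length - 1)) := by
                simp
              rw [hdrop2, ih _ (le_trans (by simp [List.length_drop]) hlcs)]
          | false =>
            have hfB : (ts ++ [t]).find? (fun t' => PySem.Chars.startswith (c :: cs) t') = none := by
              rw [List.find?_append, hf]; exact find_single_neg hswt
            rw [scanWrap_cons_none ts c cs hf, scanWrap_cons_none _ c cs hfB]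
            have hnomatch : [t].find?
                (fun t' => PySem.Chars.startswith (c :: scanWrap ts cs) t') = none := by
              apply find_single_neg
              rw [Bool.eq_false_iff]
              intro hsw
              have hp := (PySem.Chars.startswith_iff _ _).mp hsw
              cases t with
              | nil => exact hne rfl
              | cons a t₂ =>
                obtain ⟨rfl, h2⟩ := List.cons_prefix_cons.mp hp
                have h3 : t₂ <+: cs := prefix_scan ts t₂ (fun hm => hR (by simp [hm])) cs h2
                have : PySem.Chars.startswith (a :: cs) (a :: t₂) = true :=
                  (PySem.Chars.startswith_iff _ _).mpr (List.cons_prefix_cons.mpr ⟨rfl, h3⟩)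
                rw [this] at hswt; exact Bool.true_eq_false.mp hswt
            rw [scanWrap_cons_none [t] c _ hnomatch, ih cs hlcs]
  exact fun s => main s.length s le_rfl

theorem go_scan (t : List Char) (hne : t ≠ []) :
    ∀ (fuel : Nat) (l acc : List Char), l.length ≤ fuel →
      PySem.Chars.replace.go t (RLMc :: t ++ [RLMc]) fuel l acc
        = acc.reverse ++ scanWrap [t] l := by
  intro fuel
  induction fuel with
  | zero =>
    intro l acc hl
    have : l = [] := by cases l <;> simp_all
    subst this
    simp [PySem.Chars.replace.go, scanWrap_nil]
  | succ fuel ih =>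
    intro l acc hl
    cases l with
    | nil => simp [PySem.Chars.replace.go, scanWrap_nil]
    | cons c cs =>
      have hl' : cs.length ≤ fuel := by simpa using hl
      rw [PySem.Chars.replace.go]
      cases hp : t.isPrefixOf (c :: cs) with
      | true =>
        rw [if_pos rfl]
        have hlen1 : 1 ≤ t.length := by cases t <;> simp_all
        have hdl : List.drop t.length (c :: cs) = cs.drop (t.length - 1) := by
          obtain ⟨k, hk⟩ : ∃ k, t.length = k + 1 := ⟨t.length - 1, by omega⟩
          simp [hk]
        rw [hdl]
        rw [ih (cs.drop (t.length - 1)) _ (by simp [List.length_drop]; omega)]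
        rw [scanWrap_cons_match [t] c cs t
          (find_single_pos ((PySem.Chars.startswith_iff _ _).mpr (List.isPrefixOf_iff_prefix.mp hp)))]
        simp
      | false =>
        rw [if_neg (by simp)]
        rw [ih cs (c :: acc) hl']
        rw [scanWrap_cons_none [t] c cs
          (find_single_neg (by rw [Bool.eq_false_iff]; intro hsw
                               rw [show PySem.Chars.startswith (c :: cs) t
                                     = t.isPrefixOf (c :: cs) from rfl, hp] at hsw
                               exact Bool.false_eq_true.mp hsw))]
        simp

theorem replace_scan (t s : List Char) (hne : t ≠ []) :
    PySem.Chars.replace s t (RLMc :: t ++ [RLMc]) = scanWrap [t] s := by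
  rw [PySem.Chars.replace, if_neg (by simp [List.isEmpty_iff, hne])]
  simpa using go_scan t hne s.length s [] le_rfl

theorem scan_noop (t : List Char) : ∀ s : List Char, ¬ t <:+: s → scanWrap [t] s = s := by
  intro s
  induction s with
  | nil => intro _; exact scanWrap_nil [t]
  | cons c cs ih =>
    intro h
    rw [scanWrap_cons_none [t] c cs
      (find_single_neg (by
        rw [Bool.eq_false_iff]; intro hsw
        exact h ((PySem.Chars.startswith_iff _ _).mp hsw).isInfix))]
    rw [ih (fun hi => h (hi.trans (List.suffix_cons c cs).isInfix))]

theorem scan_step (t s : List Char) (hne : t ≠ []) :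
    (if PySem.Chars.isIn t s then PySem.Chars.replace s t (RLMc :: t ++ [RLMc]) else s)
      = scanWrap [t] s := by
  cases hin : PySem.Chars.isIn t s with
  | true => rw [if_pos rfl]; exact replace_scan t s hne
  | false => rw [if_neg (by simp)]; exact (scan_noop t s ((PySem.Chars.isIn_eq_false_iff t s).mp hin)).symm

theorem scan_empty_terms : ∀ s : List Char, scanWrap [] s = s := by
  intro s
  induction s with
  | nil => exact scanWrap_nil []
  | cons c cs ih => rw [scanWrap_cons_none [] c cs (by simp), ih]

def Conds : List (List Char) → List (List Char) → Prop
  | _, [] => True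
  | pre, t :: rest =>
      (t ≠ [] ∧ RLMc ∉ t ∧ (∀ t' ∈ pre, ¬ t <:+: t') ∧
        (∀ t' ∈ pre, ∀ j, j < t.length → 0 < j →
          ¬ (t.drop j <+: t') ∧ ¬ (t' <+: t.drop j)))
      ∧ Conds (pre ++ [t]) rest

theorem foldl_scan :
    ∀ (post pre : List (List Char)), (∀ t' ∈ pre, t' ≠ []) → Conds pre post →
      ∀ s : List Char,
        post.foldl (fun acc tl => scanWrap [tl] acc) (scanWrap pre s)
          = scanWrap (pre ++ post) s := by
  intro post
  induction post with
  | nil => intro pre _ _ s; simp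
  | cons t rest ih =>
    intro pre hpre hc s
    obtain ⟨⟨h1, h2, h3, h4⟩, hrest⟩ := hc
    rw [List.foldl_cons, scan_compose pre t h1 h2 hpre h3 h4 s]
    have := ih (pre ++ [t])
      (by intro t' ht'; rcases List.mem_append.mp ht' with h | h
          · exact hpre t' h
          · simp_all) hrest s
    rw [this]
    simp

theorem foldA_toList :
    ∀ (l : List String) (t : String),
      (l.foldl (fun t term =>
          if PySem.Str.isIn term t then PySem.Str.replace t term (pyRLM ++ term ++ pyRLM) else t)
        t).toList
      = l.foldl (fun acc term =>
          if PySem.Chars.isIn term.toList acc then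
            PySem.Chars.replace acc term.toList (RLMc :: term.toList ++ [RLMc])
          else acc) t.toList := by
  intro l
  induction l with
  | nil => intro t; simp
  | cons x xs ih =>
    intro t
    rw [List.foldl_cons, List.foldl_cons, ih]
    congr 1
    cases hin : PySem.Chars.isIn x.toList t.toList with
    | true =>
      rw [if_pos (by rw [PySem.Str.isIn_eq, hin]), if_pos rfl]
      rw [PySem.Str.toList_replace]
      congr 1
      simp [pyRLM, String.toList_append, String.toList_ofList]
    | false =>
      rw [if_neg (by rw [PySem.Str.isIn_eq, hin]; simp), if_neg (by simp)]

theorem conds_termsB : Conds [] termsB := by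
  simp only [termsB, List.map_cons, List.map_nil, Conds]
  repeat' apply And.intro
  all_goals trivial

theorem termsB_eq : termsB = englishTerms.map String.toList := by decide

theorem wrap_toList (text : String) :
    (wrap_english text).toList = scanWrap termsB text.toList := by
  rw [wrap_english, foldA_toList]
  rw [termsB_eq]
  rw [← List.foldl_map (f := String.toList)
    (g := fun acc tl =>
      if PySem.Chars.isIn tl acc then PySem.Chars.replace acc tl (RLMc :: tl ++ [RLMc]) else acc)]
  rw [PySem.List.foldl_congr_mem (englishTerms.map String.toList) _
    (fun acc tl => scanWrap [tl] acc) text.toList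
    (by have hne : ∀ tl ∈ englishTerms.map String.toList, tl ≠ [] := by decide
        intro acc tl htl
        exact scan_step tl acc (hne tl htl))]
  have := foldl_scan (englishTerms.map String.toList) [] (by simp) (termsB_eq ▸ conds_termsB)
  simpa [scan_empty_terms] using this text.toList

theorem final_eq (text : String) : wrap_english text = wrap_english_alt text := by
  rw [wrap_english_alt, ← wrap_toList, String.ofList_toList]

-- ===== VERDICT (by name: the statement is the Claim_ definition above) =====
theorem wrap_english_spec : Claim_equal_wrap_english := by
  intro text _
  unfold Spec_wrap_english
  exact final_eq text
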